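-- pv_equiv track=rewrite | github.com/stitch-james/advent2022 | days/day16.py | total_flow
-- ===== SOURCE A (Python) =====
-- def total_flow(path: list[str], rates: dict[str, int], distances: dict[str, dict[str, int]], from_aa: dict[str, int],
--                time: int = 30) -> int:
--     """Return the total flow released from following the path."""
--     if not path:
--         return 0
--     location = path[0]
--     time -= from_aa[location]
--     time -= 1
--     result = rates[location] * time
--     for next_valve in path[1:]:
--         time -= distances[location][next_valve]
--         time -= 1
--         location = next_valve
--         result += rates[location] * time
--     return result
-- ===== SOURCE B (Python) =====
-- def total_flow(path: list[str], rates: dict[str, int], distances: dict[str, dict[str, int]], from_aa: dict[str, int],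
--                time: int = 30) -> int:
--     """Return the total flow released from following the path."""
--     if not path:
--         return 0
--     # phase 1: per-valve step costs (travel + 1 minute to open)
--     costs = [from_aa[path[0]] + 1] + [distances[a][b] + 1 for a, b in zip(path, path[1:])]
--     # phase 2: prefix-sum the costs to get the remaining time at each valve
--     cum = []
--     c = 0
--     for x in costs:
--         c += x
--         cum.append(c)
--     times = [time - c for c in cum]
--     # phase 3: dot product of rates with remaining times
--     return sum(r * t for r, t in zip([rates[v] for v in path], times))
-- ===== Notes on version B (the rewrite author's own statement) =====
-- stated objective: alternative
-- what changed: Replaces A's single fused loop carrying (location, time, result) state with three separate passes: build the per-valve step-cost list, prefix-sum it into remaining times, then take a dot product with the rates.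
import Mathlib
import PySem

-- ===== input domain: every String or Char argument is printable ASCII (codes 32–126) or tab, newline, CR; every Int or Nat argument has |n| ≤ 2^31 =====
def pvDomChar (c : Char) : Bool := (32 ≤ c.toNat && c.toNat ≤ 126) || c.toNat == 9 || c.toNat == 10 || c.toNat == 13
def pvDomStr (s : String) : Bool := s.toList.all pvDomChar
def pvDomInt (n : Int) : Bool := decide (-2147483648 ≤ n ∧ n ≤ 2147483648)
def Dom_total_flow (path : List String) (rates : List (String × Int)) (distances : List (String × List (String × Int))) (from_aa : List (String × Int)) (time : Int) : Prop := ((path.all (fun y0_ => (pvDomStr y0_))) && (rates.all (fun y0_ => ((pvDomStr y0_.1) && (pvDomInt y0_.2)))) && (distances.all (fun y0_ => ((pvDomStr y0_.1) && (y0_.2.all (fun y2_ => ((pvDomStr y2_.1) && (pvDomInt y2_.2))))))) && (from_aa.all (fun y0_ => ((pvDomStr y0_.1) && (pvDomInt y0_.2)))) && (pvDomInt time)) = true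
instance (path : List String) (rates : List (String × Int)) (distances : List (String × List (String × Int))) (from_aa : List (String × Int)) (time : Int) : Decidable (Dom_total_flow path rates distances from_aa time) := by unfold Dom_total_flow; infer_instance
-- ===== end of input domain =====

-- B re-decomposes A's single fused loop into three passes (step costs, prefix-sum to times, dot product); same cost, return value proved equal on Pre_.

-- ===== PORT A =====
-- A's fused loop over path[1:] carrying state (location, time, result)
def total_flow (path : List String) (rates : List (String × Int)) (distances : List (String × List (String × Int))) (from_aa : List (String × Int)) (time : Int) : Int :=
  match path with
  | [] => 0
  | location :: rest =>
    let time1 : Int := time - (PySem.Dict.mk from_aa).getD location 0 - 1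
    let result : Int := (PySem.Dict.mk rates).getD location 0 * time1
    (rest.foldl (fun (s : String × Int × Int) next_valve =>
        let t : Int := s.2.1 - (PySem.Dict.mk ((PySem.Dict.mk distances).getD s.1 [])).getD next_valve 0 - 1
        (next_valve, t, s.2.2 + (PySem.Dict.mk rates).getD next_valve 0 * t))
      (location, time1, result)).2.2

-- ===== PORT B =====
-- Source B: costs list, prefix-sum loop, times list, dot product
def total_flow_alt (path : List String) (rates : List (String × Int)) (distances : List (String × List (String × Int))) (from_aa : List (String × Int)) (time : Int) : Int :=
  match path with
  | [] => 0
  | p0 :: rest =>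
    let costs : List Int := ((PySem.Dict.mk from_aa).getD p0 0 + 1) ::
      ((p0 :: rest).zip rest).map (fun ab => (PySem.Dict.mk ((PySem.Dict.mk distances).getD ab.1 [])).getD ab.2 0 + 1)
    let cum : List Int := (costs.foldl (fun (s : Int × List Int) x => (s.1 + x, s.2 ++ [s.1 + x])) (0, [])).2
    let times : List Int := cum.map (fun c => time - c)
    (((p0 :: rest).map (fun v => (PySem.Dict.mk rates).getD v 0)).zip times).foldl
      (fun acc rt => acc + rt.1 * rt.2) 0

-- ===== PRECONDITION & SPEC =====
-- Pre_ excludes exactly the inputs where A raises KeyError: path[0] missing from from_aa,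
-- some visited valve missing from rates, or a consecutive hop missing from distances.
def Pre_total_flow (path : List String) (rates : List (String × Int)) (distances : List (String × List (String × Int))) (from_aa : List (String × Int)) (time : Int) : Prop :=
  (∀ p0 ∈ path.head?, ((PySem.Dict.mk from_aa).get? p0).isSome = true) ∧
  (∀ v ∈ path, ((PySem.Dict.mk rates).get? v).isSome = true) ∧
  (∀ ab ∈ path.zip path.tail,
    (((PySem.Dict.mk distances).get? ab.1).bind (fun d => (PySem.Dict.mk d).get? ab.2)).isSome = true)
instance (path : List String) (rates : List (String × Int)) (distances : List (String × List (String × Int))) (from_aa : List (String × Int)) (time : Int) : Decidable (Pre_total_flow path rates distances from_aa time) := by unfold Pre_total_flow; infer_instance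

def pvWitness_total_flow : List String × (List (String × Int)) × (List (String × List (String × Int))) × (List (String × Int)) × Int :=
  (["a", "b"], [("a", 2), ("b", 5)], [("a", [("b", 1)])], [("a", 3)], 10)

def Spec_total_flow (path : List String) (rates : List (String × Int)) (distances : List (String × List (String × Int))) (from_aa : List (String × Int)) (time : Int) (out : Int) : Prop := out = total_flow_alt path rates distances from_aa time
instance (path : List String) (rates : List (String × Int)) (distances : List (String × List (String × Int))) (from_aa : List (String × Int)) (time : Int) (out : Int) : Decidable (Spec_total_flow path rates distances from_aa time out) := by unfold Spec_total_flow; infer_instance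

-- ===== CLAIM (what is proved, stated in full; the proofs are below) =====
def Claim_equal_total_flow : Prop := ∀ (path : List String) (rates : List (String × Int)) (distances : List (String × List (String × Int))) (from_aa : List (String × Int)) (time : Int), Dom_total_flow path rates distances from_aa time → Pre_total_flow path rates distances from_aa time → Spec_total_flow path rates distances from_aa time (total_flow path rates distances from_aa time)

-- ===== LEMMAS AND PROOFS =====

-- proof-only reference function: flow released from `rest` starting at `loc` with remaining time `t`
def flowRec (dd : String → String → Int) (rate : String → Int) : List String → String → Int → Int
  | [], _, _ => 0
  | n :: rs, loc, t => rate n * (t - dd loc n - 1) + flowRec dd rate rs n (t - dd loc n - 1)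

-- proof-only: running prefix sums starting from c
def cumFrom (c : Int) : List Int → List Int
  | [] => []
  | x :: xs => (c + x) :: cumFrom (c + x) xs

theorem foldA_eq (dd : String → String → Int) (rate : String → Int) :
    ∀ (rest : List String) (loc : String) (t r : Int),
      (rest.foldl (fun (s : String × Int × Int) nv =>
          (nv, s.2.1 - dd s.1 nv - 1, s.2.2 + rate nv * (s.2.1 - dd s.1 nv - 1)))
        (loc, t, r)).2.2 = r + flowRec dd rate rest loc t := by
  intro rest
  induction rest with
  | nil => intro loc t r; simp [flowRec]
  | cons n rs ih =>
    intro loc t r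
    simp only [List.foldl_cons, flowRec, ih]
    ring

theorem foldCum_eq : ∀ (xs : List Int) (c : Int) (l : List Int),
    xs.foldl (fun (s : Int × List Int) x => (s.1 + x, s.2 ++ [s.1 + x])) (c, l)
      = (c + xs.sum, l ++ cumFrom c xs) := by
  intro xs
  induction xs with
  | nil => intro c l; simp [cumFrom]
  | cons x xs ih =>
    intro c l
    simp only [List.foldl_cons, cumFrom, ih, List.sum_cons]
    rw [show c + x + xs.sum = c + (x + xs.sum) from by ring]
    simp

theorem foldB_eq (dd : String → String → Int) (rate : String → Int) (time : Int) :
    ∀ (rest : List String) (loc : String) (c a : Int),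
      ((rest.map rate).zip
          ((cumFrom c (((loc :: rest).zip rest).map (fun ab => dd ab.1 ab.2 + 1))).map
            (fun x => time - x))).foldl (fun acc rt => acc + rt.1 * rt.2) a
        = a + flowRec dd rate rest loc (time - c) := by
  intro rest
  induction rest with
  | nil => intro loc c a; simp [flowRec, cumFrom]
  | cons n rs ih =>
    intro loc c a
    simp only [List.zip_cons_cons, List.map_cons, cumFrom, List.foldl_cons, flowRec]
    rw [ih n (c + (dd loc n + 1))]
    have h1 : time - (c + (dd loc n + 1)) = time - c - dd loc n - 1 := by ring
    rw [h1]
    ring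

-- ===== VERDICT (by name: the statement is the Claim_ definition above) =====
theorem total_flow_spec : Claim_equal_total_flow := by
  intro path rates distances from_aa time _ _
  unfold Spec_total_flow total_flow total_flow_alt
  match path with
  | [] => rfl
  | p0 :: rest =>
    simp only
    rw [foldA_eq (fun a b => (PySem.Dict.mk ((PySem.Dict.mk distances).getD a [])).getD b 0)
        (fun v => (PySem.Dict.mk rates).getD v 0) rest]
    rw [foldCum_eq]
    simp only [List.nil_append, cumFrom, List.map_cons, List.zip_cons_cons, List.foldl_cons]
    rw [foldB_eq (fun a b => (PySem.Dict.mk ((PySem.Dict.mk distances).getD a [])).getD b 0)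
        (fun v => (PySem.Dict.mk rates).getD v 0) time rest p0
        (0 + ((PySem.Dict.mk from_aa).getD p0 0 + 1))]
    have h1 : time - (0 + ((PySem.Dict.mk from_aa).getD p0 0 + 1))
        = time - (PySem.Dict.mk from_aa).getD p0 0 - 1 := by ring
    rw [h1]
    ring
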